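-- pv_equiv track=rewrite | github.com/carlossalbertoo/EMGrip_dashboard | funciones.py | detectar_eventos
-- ===== SOURCE A (Python) =====
-- def detectar_eventos(signal, umbral_inicio=450, umbral_fin=600, fs=10, min_duracion_s=2, anticipacion_ms=250):
--     eventos = []
--     en_contraccion = False
--     inicio = None
--     min_muestras = int(min_duracion_s * fs)
--     muestras_anticipacion = int((anticipacion_ms / 1000) * fs)
--
--     for i, valor in enumerate(signal):
--         if not en_contraccion and valor >= umbral_inicio:
--             en_contraccion = True
--             # Anticipar el índice de inicio, sin ir antes del inicio de la señal
--             inicio = max(0, i - muestras_anticipacion)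
--         elif en_contraccion:
--             if i - inicio >= min_muestras and valor < umbral_fin:
--                 fin = i
--                 eventos.append((inicio, fin))
--                 en_contraccion = False
--
--     if en_contraccion and len(signal) - inicio >= min_muestras:
--         eventos.append((inicio, len(signal) - 1))
--
--     return eventos
-- ===== SOURCE B (Python) =====
-- def detectar_eventos(sig, umbral_inicio=450, umbral_fin=600, fs=10, min_duracion_s=2, anticipacion_ms=250):
--     min_muestras = int(min_duracion_s * fs)
--     muestras_anticipacion = int((anticipacion_ms / 1000) * fs)
--     eventos = []
--     n = len(sig)
--     i = 0
--     while i < n: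
--         if sig[i] >= umbral_inicio:
--             inicio = max(0, i - muestras_anticipacion)
--             j = i + 1
--             while j < n and not (j - inicio >= min_muestras and sig[j] < umbral_fin):
--                 j += 1
--             if j < n:
--                 eventos.append((inicio, j))
--                 i = j + 1
--             else:
--                 if n - inicio >= min_muestras:
--                     eventos.append((inicio, n - 1))
--                 break
--         else:
--             i += 1
--     return eventos
-- ===== Notes on version B (the rewrite author's own statement) =====
-- stated objective: alternative
-- what changed: Replaces A's flat per-sample state machine (one loop carrying en_contraccion/inicio flags plus a tail flush) with an outer while loop that scans for a contraction start and an inner while loop that searches forward for its end, resuming after it; the tail rule becomes the inner loop's fall-off-the-end case.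
import Mathlib
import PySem

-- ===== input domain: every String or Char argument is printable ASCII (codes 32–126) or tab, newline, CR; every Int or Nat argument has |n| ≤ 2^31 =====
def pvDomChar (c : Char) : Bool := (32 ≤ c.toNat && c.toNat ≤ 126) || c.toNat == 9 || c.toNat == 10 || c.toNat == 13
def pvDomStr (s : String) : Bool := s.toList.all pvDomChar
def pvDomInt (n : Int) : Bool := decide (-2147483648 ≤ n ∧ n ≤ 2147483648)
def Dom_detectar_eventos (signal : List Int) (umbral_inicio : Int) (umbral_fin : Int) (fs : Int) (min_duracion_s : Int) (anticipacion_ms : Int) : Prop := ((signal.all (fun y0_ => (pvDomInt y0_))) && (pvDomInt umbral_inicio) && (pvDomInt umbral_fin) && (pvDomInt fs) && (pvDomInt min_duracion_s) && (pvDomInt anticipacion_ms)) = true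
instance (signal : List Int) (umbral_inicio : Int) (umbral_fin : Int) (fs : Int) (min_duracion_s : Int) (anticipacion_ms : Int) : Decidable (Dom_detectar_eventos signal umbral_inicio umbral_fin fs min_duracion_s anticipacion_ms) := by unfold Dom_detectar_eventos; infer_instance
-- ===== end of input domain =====

-- B replaces A's flat per-sample state machine by an outer find-start scan with an inner
-- find-end scan (same values, different decomposition); equivalence of RETURN values is proved.

-- ===== PORT A =====
-- Shared helper: exact integer model of Python's float expression int((a / 1000) * fs)
-- (both Pythons compute the parameter conversion with this very expression).
-- pvRHE n d = round-half-to-even of n/d for n ≥ 0, d > 0 (exact there).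
def pvRHE (n d : Int) : Int :=
  let q := n / d
  let r := n % d
  if 2 * r < d then q else if 2 * r > d then q + 1 else if q % 2 = 0 then q else q + 1

-- round n/(den*2^e) half to even
def pvQAt (n den e : Int) : Int :=
  if 0 ≤ e then pvRHE n (den * 2 ^ e.toNat) else pvRHE (n * 2 ^ (-e).toNat) den

def pvBitLen (n : Int) : Int := (Nat.log2 n.toNat + 1 : Nat)

-- round num/den (den > 0) to the nearest IEEE double, returned as (m, e) with value m * 2^e
def pvRnd (num den : Int) : Int × Int :=
  if num = 0 then (0, 0)
  else
    let s : Int := if 0 < num then 1 else -1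
    let n := |num|
    let e0 := pvBitLen n - pvBitLen den - 53
    let q0 := pvQAt n den e0
    let p1 := if q0 < 2 ^ 52 then (pvQAt n den (e0 - 1), e0 - 1) else (q0, e0)
    let p2 := if 2 ^ 53 ≤ p1.1 then (pvQAt n den (p1.2 + 1), p1.2 + 1) else p1
    let p3 := if 2 ^ 53 ≤ p2.1 then (pvQAt n den (p2.2 + 1), p2.2 + 1) else p2
    (s * p3.1, p3.2)

-- int((a / 1000) * fs) with Python float semantics, exactly (true division, product, truncate)
def pvAnt (a fs : Int) : Int :=
  let me := pvRnd a 1000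
  let p := me.1 * fs
  if p = 0 then 0
  else
    let me2 := if 0 ≤ me.2 then pvRnd (p * 2 ^ me.2.toNat) 1 else pvRnd p (2 ^ (-me.2).toNat)
    if 0 ≤ me2.2 then me2.1 * 2 ^ me2.2.toNat
    else (if 0 < me2.1 then (1 : Int) else -1) * ((me2.1.natAbs : Int) / 2 ^ (-me2.2).toNat)

-- one iteration of A's for-loop body; state = (eventos, en_contraccion, inicio)
def pvStepA (umbral_inicio umbral_fin min_muestras muestras_anticipacion : Int)
    (st : List (Int × Int) × Bool × Option Int) (p : Int × Int) :
    List (Int × Int) × Bool × Option Int :=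
  if st.2.1 = false ∧ p.2 ≥ umbral_inicio then
    (st.1, true, some (max 0 (p.1 - muestras_anticipacion)))
  else if st.2.1 then
    (if p.1 - st.2.2.getD 0 ≥ min_muestras ∧ p.2 < umbral_fin then
      (st.1 ++ [(st.2.2.getD 0, p.1)], false, st.2.2)
    else st)
  else st

-- A's trailing "if en_contraccion and len(signal) - inicio >= min_muestras" flush
def pvFlushA (signal : List Int) (min_muestras : Int)
    (st : List (Int × Int) × Bool × Option Int) : List (Int × Int) :=
  if st.2.1 ∧ (signal.length : Int) - st.2.2.getD 0 ≥ min_muestras then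
    st.1 ++ [(st.2.2.getD 0, (signal.length : Int) - 1)]
  else st.1

def detectar_eventos (signal : List Int) (umbral_inicio : Int) (umbral_fin : Int) (fs : Int) (min_duracion_s : Int) (anticipacion_ms : Int) : List (Int × Int) :=
  let min_muestras := min_duracion_s * fs
  let muestras_anticipacion := pvAnt anticipacion_ms fs
  let st := (PySem.List.enumerate signal 0).foldl
      (pvStepA umbral_inicio umbral_fin min_muestras muestras_anticipacion) ([], false, none)
  pvFlushA signal min_muestras st

-- ===== PORT B =====
mutual
-- outer while: advance i (index of the head of the remaining suffix) until signal[i] >= umbral_inicio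
def pvAltStart (n uin ufin minM mAnt : Int) (i : Int) : List Int → List (Int × Int)
  | [] => []
  | v :: r =>
    if v ≥ uin then pvAltEnd n uin ufin minM mAnt (max 0 (i - mAnt)) (i + 1) r
    else pvAltStart n uin ufin minM mAnt (i + 1) r
-- inner while: advance j until the event can end; falling off the end applies the tail rule
def pvAltEnd (n uin ufin minM mAnt : Int) (inicio : Int) (j : Int) : List Int → List (Int × Int)
  | [] => if n - inicio ≥ minM then [(inicio, n - 1)] else []
  | v :: r =>
    if j - inicio ≥ minM ∧ v < ufin then (inicio, j) :: pvAltStart n uin ufin minM mAnt (j + 1) r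
    else pvAltEnd n uin ufin minM mAnt inicio (j + 1) r
end

def detectar_eventos_alt (signal : List Int) (umbral_inicio : Int) (umbral_fin : Int) (fs : Int) (min_duracion_s : Int) (anticipacion_ms : Int) : List (Int × Int) :=
  pvAltStart (signal.length : Int) umbral_inicio umbral_fin (min_duracion_s * fs) (pvAnt anticipacion_ms fs) 0 signal

-- ===== PRECONDITION & SPEC =====
def Spec_detectar_eventos (signal : List Int) (umbral_inicio : Int) (umbral_fin : Int) (fs : Int) (min_duracion_s : Int) (anticipacion_ms : Int) (out : List (Int × Int)) : Prop := out = detectar_eventos_alt signal umbral_inicio umbral_fin fs min_duracion_s anticipacion_ms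
instance (signal : List Int) (umbral_inicio : Int) (umbral_fin : Int) (fs : Int) (min_duracion_s : Int) (anticipacion_ms : Int) (out : List (Int × Int)) : Decidable (Spec_detectar_eventos signal umbral_inicio umbral_fin fs min_duracion_s anticipacion_ms out) := by unfold Spec_detectar_eventos; infer_instance

-- ===== CLAIM (what is proved, stated in full; the proofs are below) =====
def Claim_equal_detectar_eventos : Prop := ∀ (signal : List Int) (umbral_inicio : Int) (umbral_fin : Int) (fs : Int) (min_duracion_s : Int) (anticipacion_ms : Int), Dom_detectar_eventos signal umbral_inicio umbral_fin fs min_duracion_s anticipacion_ms → Spec_detectar_eventos signal umbral_inicio umbral_fin fs min_duracion_s anticipacion_ms (detectar_eventos signal umbral_inicio umbral_fin fs min_duracion_s anticipacion_ms)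

-- ===== LEMMAS AND PROOFS =====

lemma pv_loop (signal : List Int) (uin ufin minM mAnt : Int) :
    ∀ (rest : List Int) (i : Int),
    ((∀ (acc : List (Int × Int)) (opt : Option Int),
        pvFlushA signal minM ((PySem.List.enumerate rest i).foldl
          (pvStepA uin ufin minM mAnt) (acc, false, opt))
        = acc ++ pvAltStart (signal.length : Int) uin ufin minM mAnt i rest)
    ∧ (∀ (acc : List (Int × Int)) (inicio : Int),
        pvFlushA signal minM ((PySem.List.enumerate rest i).foldl
          (pvStepA uin ufin minM mAnt) (acc, true, some inicio))
        = acc ++ pvAltEnd (signal.length : Int) uin ufin minM mAnt inicio i rest)) := by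
  intro rest
  induction rest with
  | nil =>
    intro i
    constructor
    · intro acc opt
      simp [PySem.List.enumerate, pvFlushA, pvAltStart]
    · intro acc inicio
      simp only [PySem.List.enumerate_nil, List.foldl_nil, pvFlushA, pvAltEnd]
      by_cases hc : (signal.length : Int) - inicio ≥ minM
      · simp [hc]
      · simp [hc]
  | cons v rest' ih =>
    intro i
    constructor
    · intro acc opt
      rw [PySem.List.enumerate_cons, List.foldl_cons, pvAltStart]
      by_cases hs : v ≥ uin
      · rw [if_pos hs]
        have hstep : pvStepA uin ufin minM mAnt (acc, false, opt) (i, v)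
            = (acc, true, some (max 0 (i - mAnt))) := by
          simp [pvStepA, hs]
        rw [hstep]
        exact (ih (i + 1)).2 acc (max 0 (i - mAnt))
      · rw [if_neg hs]
        have hstep : pvStepA uin ufin minM mAnt (acc, false, opt) (i, v)
            = (acc, false, opt) := by
          simp [pvStepA, hs]
        rw [hstep]
        exact (ih (i + 1)).1 acc opt
    · intro acc inicio
      rw [PySem.List.enumerate_cons, List.foldl_cons, pvAltEnd]
      by_cases he : i - inicio ≥ minM ∧ v < ufin
      · rw [if_pos he]
        have hstep : pvStepA uin ufin minM mAnt (acc, true, some inicio) (i, v)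
            = (acc ++ [(inicio, i)], false, some inicio) := by
          simp [pvStepA, he.1, he.2]
        rw [hstep]
        have := (ih (i + 1)).1 (acc ++ [(inicio, i)]) (some inicio)
        rw [this, List.append_assoc]
        rfl
      · rw [if_neg he]
        have hstep : pvStepA uin ufin minM mAnt (acc, true, some inicio) (i, v)
            = (acc, true, some inicio) := by
          rcases not_and_or.mp he with h | h <;> simp [pvStepA, h]
        rw [hstep]
        exact (ih (i + 1)).2 acc inicio

-- ===== VERDICT (by name: the statement is the Claim_ definition above) =====
theorem detectar_eventos_spec : Claim_equal_detectar_eventos := by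
  intro signal uin ufin fs md am _
  unfold Spec_detectar_eventos detectar_eventos detectar_eventos_alt
  simpa using (pv_loop signal uin ufin (md * fs) (pvAnt am fs) signal 0).1 [] none
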